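-- pv_equiv track=rewrite | github.com/mohammadfaiizan/ProjectI | DSA/Problem/Graph/05_Shortest_Path_Algorithms/1066_Campus_Bikes_II.py | assignBikes_hungarian_simplified
-- ===== SOURCE A (Python) =====
-- from typing import List, Tuple
--
-- def assignBikes_hungarian_simplified(workers: List[List[int]], bikes: List[List[int]]) -> int:
--     """
--     Approach 4: Simplified Hungarian Algorithm
--
--     Use simplified version of Hungarian algorithm for assignment.
--
--     Time: O(N^3), Space: O(N^2)
--     """
--     n, m = len(workers), len(bikes)
--
--     def manhattan_distance(p1: List[int], p2: List[int]) -> int: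
--         return abs(p1[0] - p2[0]) + abs(p1[1] - p2[1])
--
--     # Create cost matrix (only consider first n bikes for simplicity)
--     cost_matrix = [[0] * n for _ in range(n)]
--     for i in range(n):
--         for j in range(min(n, m)):
--             cost_matrix[i][j] = manhattan_distance(workers[i], bikes[j])
--
--     # Simple assignment using minimum cost matching
--     # This is a simplified version - full Hungarian algorithm is more complex
--     used_bikes = [False] * n
--     total_cost = 0
--
--     for worker in range(n):
--         min_cost = float('inf')
--         best_bike = -1
--
--         for bike in range(min(n, m)):
--             if not used_bikes[bike] and cost_matrix[worker][bike] < min_cost: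
--                 min_cost = cost_matrix[worker][bike]
--                 best_bike = bike
--
--         if best_bike != -1:
--             used_bikes[best_bike] = True
--             total_cost += min_cost
--
--     return total_cost
-- ===== SOURCE B (Python) =====
-- def assignBikes_hungarian_simplified(workers, bikes):
--     k = min(len(workers), len(bikes))
--     used = [False] * k
--     total = 0
--     for w in workers:
--         order = sorted(range(k), key=lambda j: abs(w[0] - bikes[j][0]) + abs(w[1] - bikes[j][1]))
--         for j in order:
--             if not used[j]:
--                 used[j] = True
--                 total += abs(w[0] - bikes[j][0]) + abs(w[1] - bikes[j][1])
--                 break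
--     return total
-- ===== Notes on version B (the rewrite author's own statement) =====
-- stated objective: alternative
-- what changed: Replaces A's n-by-n cost matrix plus per-worker linear min-scan with sentinel state by, per worker, a stable sort of the bike indices by distance followed by picking the first not-yet-used index (sort-then-first-available), which reproduces the lowest-index tie-break without any cost matrix or infinity sentinel.
import Mathlib
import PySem

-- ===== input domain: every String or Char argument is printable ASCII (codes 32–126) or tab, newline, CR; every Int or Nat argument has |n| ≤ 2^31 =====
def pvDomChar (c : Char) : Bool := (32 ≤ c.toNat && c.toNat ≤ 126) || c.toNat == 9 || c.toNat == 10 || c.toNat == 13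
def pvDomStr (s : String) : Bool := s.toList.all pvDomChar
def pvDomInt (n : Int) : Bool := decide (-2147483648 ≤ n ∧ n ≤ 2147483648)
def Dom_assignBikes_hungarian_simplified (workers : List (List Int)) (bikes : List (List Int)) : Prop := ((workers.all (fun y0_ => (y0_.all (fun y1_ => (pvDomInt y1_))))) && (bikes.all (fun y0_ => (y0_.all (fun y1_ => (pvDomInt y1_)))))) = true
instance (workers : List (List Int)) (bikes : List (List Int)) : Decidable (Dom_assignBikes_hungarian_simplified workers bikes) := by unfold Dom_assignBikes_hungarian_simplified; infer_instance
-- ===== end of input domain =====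

-- B replaces A's n×n cost matrix and per-worker min-scan with a per-worker stable sort of the
-- bike indices by distance followed by taking the first unused index; same greedy semantics,
-- stated objective: alternative (no speed claim). Return-value equivalence only (no mutation).

-- ===== PORT A =====
def pvManhattan (p1 p2 : List Int) : Int :=
  |PySem.List.pyGetD p1 0 0 - PySem.List.pyGetD p2 0 0| +
  |PySem.List.pyGetD p1 1 0 - PySem.List.pyGetD p2 1 0|

def assignBikes_hungarian_simplified (workers : List (List Int)) (bikes : List (List Int)) : Int :=
  let n : Int := PySem.List.len workers
  let m : Int := PySem.List.len bikes
  -- cost_matrix = [[0]*n for _ in range(n)]; cost_matrix[i][j] = manhattan for j < min(n, m)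
  let costMatrix : List (List Int) :=
    (PySem.List.pyRange 0 n).map (fun i =>
      (PySem.List.pyRange 0 n).map (fun j =>
        if j < min n m then pvManhattan (PySem.List.pyGetD workers i [])
                                        (PySem.List.pyGetD bikes j []) else 0))
  let final : List Bool × Int :=
    (PySem.List.pyRange 0 n).foldl (fun st worker =>
      -- min_cost = inf (modelled as none), best_bike = -1
      let inner : Option Int × Int :=
        (PySem.List.pyRange 0 (min n m)).foldl (fun st2 bike =>
          if (!(PySem.List.pyGetD st.1 bike false) &&
              (match st2.1 with
               | none => true
               | some c => decide (PySem.List.pyGetD (PySem.List.pyGetD costMatrix worker []) bike 0 < c)))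
          then (some (PySem.List.pyGetD (PySem.List.pyGetD costMatrix worker []) bike 0), bike)
          else st2) (none, -1)
      if inner.2 ≠ -1 then (st.1.set inner.2.toNat true, st.2 + inner.1.getD 0) else st)
      (List.replicate n.toNat false, 0)
  final.2

-- ===== PORT B =====
def pvDistB (bikes : List (List Int)) (w : List Int) (j : Int) : Int :=
  |PySem.List.pyGetD w 0 0 - PySem.List.pyGetD (PySem.List.pyGetD bikes j []) 0 0| +
  |PySem.List.pyGetD w 1 0 - PySem.List.pyGetD (PySem.List.pyGetD bikes j []) 1 0|

def assignBikes_hungarian_simplified_alt (workers : List (List Int)) (bikes : List (List Int)) : Int :=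
  let k : Int := min (PySem.List.len workers) (PySem.List.len bikes)
  let final : List Bool × Int :=
    workers.foldl (fun st w =>
      let order := PySem.List.sorted (PySem.List.pyRange 0 k) (pvDistB bikes w)
      match order.find? (fun j => !(PySem.List.pyGetD st.1 j false)) with
      | some j => (st.1.set j.toNat true, st.2 + pvDistB bikes w j)
      | none => st) (List.replicate k.toNat false, 0)
  final.2

-- ===== PRECONDITION & SPEC =====
-- Pre_ excludes exactly the inputs where Python A raises IndexError: when both lists are
-- nonempty, every worker and each of the first min(n,m) bikes must have at least 2 coordinates.
def Pre_assignBikes_hungarian_simplified (workers : List (List Int)) (bikes : List (List Int)) : Prop :=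
  workers = [] ∨ bikes = [] ∨
    ((workers.all (fun w => 2 ≤ w.length) &&
      (bikes.take (min workers.length bikes.length)).all (fun b => 2 ≤ b.length)) = true)
instance (workers : List (List Int)) (bikes : List (List Int)) : Decidable (Pre_assignBikes_hungarian_simplified workers bikes) := by unfold Pre_assignBikes_hungarian_simplified; infer_instance

def pvWitness_assignBikes_hungarian_simplified : List (List Int) × List (List Int) :=
  ([[0, 0], [2, 1]], [[1, 2], [3, 3], [0, 0]])

def Spec_assignBikes_hungarian_simplified (workers : List (List Int)) (bikes : List (List Int)) (out : Int) : Prop := out = assignBikes_hungarian_simplified_alt workers bikes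
instance (workers : List (List Int)) (bikes : List (List Int)) (out : Int) : Decidable (Spec_assignBikes_hungarian_simplified workers bikes out) := by unfold Spec_assignBikes_hungarian_simplified; infer_instance

-- ===== CLAIM (what is proved, stated in full; the proofs are below) =====
def Claim_equal_assignBikes_hungarian_simplified : Prop := ∀ (workers : List (List Int)) (bikes : List (List Int)), Dom_assignBikes_hungarian_simplified workers bikes → Pre_assignBikes_hungarian_simplified workers bikes → Spec_assignBikes_hungarian_simplified workers bikes (assignBikes_hungarian_simplified workers bikes)

-- ===== LEMMAS AND PROOFS =====

-- `pick f l` = the first element of l attaining the strict running minimum of f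
-- (exactly A's min-scan restricted to the candidates that pass the used-test).
def pvPick (f : Int → Int) (l : List Int) : Option Int :=
  l.foldl (fun acc j => match acc with
    | none => some j
    | some b => if f j < f b then some j else acc) none

theorem pvPick_append (f : Int → Int) (l : List Int) (x : Int) :
    pvPick f (l ++ [x]) = (match pvPick f l with
      | none => some x
      | some b => if f x < f b then some x else some b) := by
  have h : pvPick f (l ++ [x]) = (match pvPick f l with
      | none => some x
      | some b => if f x < f b then some x else pvPick f l) := by
    simp [pvPick, List.foldl_append]
  rw [h]
  cases hp : pvPick f l with
  | none => rfl
  | some b => simp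

theorem pvPick_mem (f : Int → Int) (l : List Int) (b : Int) (h : pvPick f l = some b) : b ∈ l := by
  induction l using List.reverseRecOn generalizing b with
  | nil => simp [pvPick] at h
  | append_singleton l x ih =>
      rw [pvPick_append] at h
      cases hp : pvPick f l with
      | none => rw [hp] at h; simp at h; simp [h]
      | some c =>
          rw [hp] at h
          by_cases hlt : f x < f c
          · simp [hlt] at h; simp [h]
          · simp [hlt] at h; subst h; exact List.mem_append_left _ (ih c hp)

theorem pv_find?_insertBy (f : Int → Int) (P : Int → Bool) (x : Int) (l : List Int)
    (hl : l.Pairwise (fun a b => f a ≤ f b)) :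
    (PySem.List.insertBy (fun a b => decide (f a < f b)) x l).find? P =
      (match l.find? P with
       | none => if P x then some x else none
       | some b => if P x && decide (f x < f b) then some x else some b) := by
  induction l with
  | nil => cases hP : P x <;> simp [PySem.List.insertBy, List.find?, hP]
  | cons y ys ih =>
      have hpw : ys.Pairwise (fun a b => f a ≤ f b) := (List.pairwise_cons.1 hl).2
      have hy : ∀ z ∈ ys, f y ≤ f z := (List.pairwise_cons.1 hl).1
      by_cases hxy : f x < f y
      · simp only [PySem.List.insertBy, hxy, decide_true, if_true]
        have hfb : ∀ b, (y :: ys).find? P = some b → f x < f b := by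
          intro b hb
          rcases List.mem_cons.1 (List.mem_of_find?_eq_some hb) with h | h
          · exact h ▸ hxy
          · exact lt_of_lt_of_le hxy (hy b h)
        cases hP : P x
        · rw [List.find?_cons_of_neg (by simp [hP])]
          cases hfind : (y :: ys).find? P with
          | none => simp
          | some b => simp
        · rw [List.find?_cons_of_pos (by simp [hP])]
          cases hfind : (y :: ys).find? P with
          | none => simp
          | some b => simp [hfb b hfind]
      · simp only [PySem.List.insertBy, hxy, decide_false, Bool.false_eq_true, if_false]
        cases hPy : P y
        · rw [List.find?_cons_of_neg (by simp [hPy]), List.find?_cons_of_neg (by simp [hPy])]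
          exact ih hpw
        · rw [List.find?_cons_of_pos (by simp [hPy]), List.find?_cons_of_pos (by simp [hPy])]
          simp [hxy]

theorem pv_sorted_append (f : Int → Int) (xs : List Int) (x : Int) :
    PySem.List.sorted (xs ++ [x]) f =
      PySem.List.insertBy (fun a b => decide (f a < f b)) x (PySem.List.sorted xs f) := by
  simp [PySem.List.sorted, List.foldl_append]

theorem pv_sortfind (f : Int → Int) (xs : List Int) (P : Int → Bool) :
    (PySem.List.sorted xs f).find? P = pvPick f (xs.filter P) := by
  induction xs using List.reverseRecOn with
  | nil => simp [PySem.List.sorted, pvPick]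
  | append_singleton xs x ih =>
      rw [pv_sorted_append, pv_find?_insertBy f P x _ (PySem.List.sorted_pairwise xs f), ih]
      rw [List.filter_append]
      cases hP : P x
      · simp only [List.filter, hP]
        cases hpick : pvPick f (xs.filter P) <;> simp [hpick]
      · simp only [List.filter, hP]
        rw [pvPick_append]
        cases hpick : pvPick f (xs.filter P)
        · simp
        · simp

theorem pv_afold (f : Int → Int) (P : Int → Bool) (R : List Int) :
    R.foldl (fun (st2 : Option Int × Int) j =>
        if (P j && (match st2.1 with
                    | none => true
                    | some c => decide (f j < c)))
        then (some (f j), j) else st2) (none, -1) =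
      (match pvPick f (R.filter P) with
       | none => ((none : Option Int), (-1 : Int))
       | some b => (some (f b), b)) := by
  induction R using List.reverseRecOn with
  | nil => simp [pvPick]
  | append_singleton R x ih =>
      rw [List.foldl_append, ih, List.filter_append]
      cases hP : P x
      · simp only [List.filter, hP, List.append_nil]
        cases hpick : pvPick f (R.filter P) <;> simp [hP]
      · simp only [List.filter, hP]
        rw [pvPick_append]
        cases hpick : pvPick f (R.filter P) with
        | none => simp [hP]
        | some b =>
            by_cases hlt : f x < f b <;> simp [hP, hlt]

-- the three per-worker step shapes the proof moves between
def pvRow (bikes : List (List Int)) (n k : Int) (w : List Int) : List Int :=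
  (PySem.List.pyRange 0 n).map (fun j =>
    if j < k then pvManhattan w (PySem.List.pyGetD bikes j []) else 0)

def pvStepRow (bikes : List (List Int)) (n k : Int) (st : List Bool × Int) (w : List Int) :
    List Bool × Int :=
  let inner : Option Int × Int :=
    (PySem.List.pyRange 0 k).foldl (fun st2 bike =>
      if (!(PySem.List.pyGetD st.1 bike false) &&
          (match st2.1 with
           | none => true
           | some c => decide (PySem.List.pyGetD (pvRow bikes n k w) bike 0 < c)))
      then (some (PySem.List.pyGetD (pvRow bikes n k w) bike 0), bike)
      else st2) (none, -1)
  if inner.2 ≠ -1 then (st.1.set inner.2.toNat true, st.2 + inner.1.getD 0) else st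

def pvStepA (bikes : List (List Int)) (k : Int) (st : List Bool × Int) (w : List Int) :
    List Bool × Int :=
  match pvPick (pvDistB bikes w)
      ((PySem.List.pyRange 0 k).filter (fun j => !(PySem.List.pyGetD st.1 j false))) with
  | some b => (st.1.set b.toNat true, st.2 + pvDistB bikes w b)
  | none => st

def pvStepB (bikes : List (List Int)) (k : Int) (st : List Bool × Int) (w : List Int) :
    List Bool × Int :=
  match (PySem.List.sorted (PySem.List.pyRange 0 k) (pvDistB bikes w)).find?
      (fun j => !(PySem.List.pyGetD st.1 j false)) with
  | some j => (st.1.set j.toNat true, st.2 + pvDistB bikes w j)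
  | none => st

theorem pvPick_range_nonneg (f : Int → Int) (P : Int → Bool) (k b : Int)
    (h : pvPick f ((PySem.List.pyRange 0 k).filter P) = some b) : 0 ≤ b ∧ b < k := by
  have hb := pvPick_mem f _ b h
  exact PySem.List.mem_pyRange_one.1 (List.mem_of_mem_filter hb)

theorem pv_A_eq (workers bikes : List (List Int)) :
    assignBikes_hungarian_simplified workers bikes =
      (workers.foldl
        (pvStepRow bikes (PySem.List.len workers)
          (min (PySem.List.len workers) (PySem.List.len bikes)))
        (List.replicate (PySem.List.len workers).toNat false, 0)).2 := by
  unfold assignBikes_hungarian_simplified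
  dsimp only []
  rw [PySem.List.foldl_congr_mem _ _
    (fun st i => pvStepRow bikes (PySem.List.len workers)
      (min (PySem.List.len workers) (PySem.List.len bikes)) st (PySem.List.pyGetD workers i []))
    _ ?_]
  · rw [PySem.List.foldl_pyRange_pyGetD workers ([] : List Int)
      (pvStepRow bikes (PySem.List.len workers)
        (min (PySem.List.len workers) (PySem.List.len bikes))) _ le_rfl]
    simp
  · intro st i hi
    obtain ⟨hi0, hin⟩ := PySem.List.mem_pyRange_one.1 hi
    have hrow : PySem.List.pyGetD
        ((PySem.List.pyRange 0 (PySem.List.len workers)).map (fun i =>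
          (PySem.List.pyRange 0 (PySem.List.len workers)).map (fun j =>
            if j < min (PySem.List.len workers) (PySem.List.len bikes)
            then pvManhattan (PySem.List.pyGetD workers i []) (PySem.List.pyGetD bikes j [])
            else 0))) i [] =
        pvRow bikes (PySem.List.len workers)
          (min (PySem.List.len workers) (PySem.List.len bikes))
          (PySem.List.pyGetD workers i []) := by
      rw [show i = ((i.toNat : Nat) : Int) from (Int.toNat_of_nonneg hi0).symm]
      rw [show (PySem.List.len workers : Int) = ((workers.length : Nat) : Int) from rfl]
      rw [PySem.List.pyGetD_map_pyRange _ workers.length i.toNat []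
        (by simp [PySem.List.len] at hin; omega)]
      rfl
    simp only [pvStepRow, hrow]

theorem pv_stepRow_eq (bikes : List (List Int)) (n k : Int) (hk : 0 ≤ k) (hkn : k ≤ n)
    (st : List Bool × Int) (w : List Int) :
    pvStepRow bikes n k st w = pvStepA bikes k st w := by
  unfold pvStepRow pvStepA
  rw [PySem.List.foldl_congr_mem _ _
    (fun (st2 : Option Int × Int) j =>
      if ((!(PySem.List.pyGetD st.1 j false)) &&
          (match st2.1 with
           | none => true
           | some c => decide (pvDistB bikes w j < c)))
      then (some (pvDistB bikes w j), j) else st2) _ ?_]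
  · rw [pv_afold]
    cases hpick : pvPick (pvDistB bikes w)
        ((PySem.List.pyRange 0 k).filter (fun j => !(PySem.List.pyGetD st.1 j false))) with
    | none => simp
    | some b =>
        obtain ⟨hb0, hbk⟩ := pvPick_range_nonneg _ _ _ _ hpick
        have hne : b ≠ -1 := by omega
        simp [hne]
  · intro st2 j hj
    obtain ⟨hj0, hjk⟩ := PySem.List.mem_pyRange_one.1 hj
    have hval : PySem.List.pyGetD (pvRow bikes n k w) j 0 = pvDistB bikes w j := by
      unfold pvRow
      rw [show j = ((j.toNat : Nat) : Int) from (Int.toNat_of_nonneg hj0).symm]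
      rw [show n = ((n.toNat : Nat) : Int) from (Int.toNat_of_nonneg (le_trans hk hkn)).symm]
      rw [PySem.List.pyGetD_map_pyRange _ n.toNat j.toNat 0 (by omega)]
      rw [if_pos (by omega)]
      rfl
    rw [hval]

theorem pv_stepB_eq (bikes : List (List Int)) (k : Int) (st : List Bool × Int) (w : List Int) :
    pvStepB bikes k st w = pvStepA bikes k st w := by
  unfold pvStepB pvStepA
  rw [pv_sortfind]

theorem pv_B_eq (workers bikes : List (List Int)) :
    assignBikes_hungarian_simplified_alt workers bikes =
      (workers.foldl
        (pvStepB bikes (min (PySem.List.len workers) (PySem.List.len bikes)))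
        (List.replicate (min (PySem.List.len workers) (PySem.List.len bikes)).toNat false, 0)).2 := by
  rfl

theorem pv_getD_take (l : List Bool) (i k : Nat) (h : i < k) :
    (l.take k).getD i false = l.getD i false := by
  simp [List.getD, h]

theorem pv_stepA_take (bikes : List (List Int)) (k : Int) (hk : 0 ≤ k)
    (uA : List Bool) (tot : Int) (w : List Int) :
    pvStepA bikes k (uA.take k.toNat, tot) w =
      ((pvStepA bikes k (uA, tot) w).1.take k.toNat, (pvStepA bikes k (uA, tot) w).2) := by
  unfold pvStepA
  have hfilter : (PySem.List.pyRange 0 k).filter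
      (fun j => !(PySem.List.pyGetD ((uA.take k.toNat, tot) : List Bool × Int).1 j false)) =
      (PySem.List.pyRange 0 k).filter
      (fun j => !(PySem.List.pyGetD ((uA, tot) : List Bool × Int).1 j false)) := by
    apply List.filter_congr
    intro j hj
    obtain ⟨hj0, hjk⟩ := PySem.List.mem_pyRange_one.1 hj
    simp only [PySem.List.pyGetD_of_nonneg _ _ hj0]
    rw [pv_getD_take uA j.toNat k.toNat (by omega)]
  rw [hfilter]
  cases hpick : pvPick (pvDistB bikes w)
      ((PySem.List.pyRange 0 k).filter (fun j => !(PySem.List.pyGetD uA j false))) with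
  | none => rfl
  | some b => simp [List.take_set]

theorem pv_foldl_take (bikes : List (List Int)) (k : Int) (hk : 0 ≤ k) :
    ∀ (ws : List (List Int)) (uA : List Bool) (tot : Int),
      ws.foldl (pvStepA bikes k) (uA.take k.toNat, tot) =
        ((ws.foldl (pvStepA bikes k) (uA, tot)).1.take k.toNat,
         (ws.foldl (pvStepA bikes k) (uA, tot)).2) := by
  intro ws
  induction ws with
  | nil => intro uA tot; rfl
  | cons w ws ih =>
      intro uA tot
      rw [List.foldl_cons, List.foldl_cons, pv_stepA_take bikes k hk uA tot w]
      exact ih _ _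

-- ===== VERDICT (by name: the statement is the Claim_ definition above) =====
theorem assignBikes_hungarian_simplified_spec : Claim_equal_assignBikes_hungarian_simplified := by
  intro workers bikes _ _
  unfold Spec_assignBikes_hungarian_simplified
  rw [pv_A_eq, pv_B_eq]
  have hk : 0 ≤ min (PySem.List.len workers) (PySem.List.len bikes) := by
    simp [PySem.List.len]
  have hkn : min (PySem.List.len workers) (PySem.List.len bikes) ≤ PySem.List.len workers :=
    min_le_left _ _
  have hA : pvStepRow bikes (PySem.List.len workers)
      (min (PySem.List.len workers) (PySem.List.len bikes)) =
      pvStepA bikes (min (PySem.List.len workers) (PySem.List.len bikes)) :=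
    funext fun st => funext fun w => pv_stepRow_eq bikes _ _ hk hkn st w
  have hB : pvStepB bikes (min (PySem.List.len workers) (PySem.List.len bikes)) =
      pvStepA bikes (min (PySem.List.len workers) (PySem.List.len bikes)) :=
    funext fun st => funext fun w => pv_stepB_eq bikes _ st w
  rw [hA, hB]
  have hrep : (List.replicate (min (PySem.List.len workers) (PySem.List.len bikes)).toNat false)
      = (List.replicate (PySem.List.len workers).toNat false).take
          (min (PySem.List.len workers) (PySem.List.len bikes)).toNat := by
    rw [List.take_replicate]
    congr 1
    simp [PySem.List.len]
  rw [hrep, pv_foldl_take bikes _ hk]
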